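-- pv_equiv track=rewrite | github.com/Brady-White/COP4533Project | program4.py | program4
-- ===== SOURCE A (Python) =====
-- from typing import List, Tuple
--
-- def program4(n: int, W: int, heights: List[int], widths: List[int]) -> Tuple[int, int, List[int]]:
--     """
--     Solution to Program 4
--     Parameters:
--     n (int): number of paintings
--     W (int): width of the platform
--     heights (List[int]): heights of the paintings
--     widths (List[int]): widths of the paintings
--     Returns:
--     int: number of platforms used
--     int: optimal total height
--     List[int]: number of paintings on each platform
--     """
--     # Initialized dp array to store min_cost, num_platforms, platform_distribution for each painting
--     dp = [(float('inf'), 0, [])] * (n + 1)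
--     dp[0] = (0, 0, [])  # basecase essentially
--
--     # Iterating over each painting to determine the optimal arrangements up until that painting
--     for i in range(1, n + 1):
--         # Nested loop to go through all possible configurations ending at the painting i
--         for j in range(1, i + 1):
--             total_width = 0
--             max_height = 0
--             # 3rd loop Calculating the total width and max height for the configutation of paintings from j to i
--             for k in range(j, i + 1):
--                 total_width += widths[k - 1]
--                 if total_width > W:
--                     break  # break if goes beyond platform width
--                 max_height = max(max_height, heights[k - 1])
--
--             # If the config of paintings from j to i can fit on a single  platform
--             if total_width <= W:
--                 current_cost = dp[j - 1][0] + max_height  # Calculate the new cost if we are adding this platform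
--                 # Update dp[i] if  configuration is lower in cost
--                 if current_cost < dp[i][0]:
--                     dp[i] = (current_cost, dp[j - 1][1] + 1, dp[j - 1][2] + [i - j + 1])
--     return dp[n][1], dp[n][0], dp[n][2]
-- ===== SOURCE B (Python) =====
-- from typing import List, Tuple
--
-- def program4(n: int, W: int, heights: List[int], widths: List[int]) -> Tuple[int, int, List[int]]:
--     """
--     Min-total-height partition of paintings 1..n onto platforms of width W.
--     O(n^2): for each end index i the start index j scans downwards while the
--     segment's total width and max height are accumulated incrementally.
--     Returns (number of platforms, optimal total height, paintings per platform).
--     """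
--     INF = float('inf')
--     dp = [(0, 0, [])]  # dp[t] = (cost, platforms, distribution) for the first t paintings
--     for i in range(1, n + 1):
--         best = (INF, 0, [])
--         width = 0
--         h = 0
--         for j in range(i, 0, -1):
--             width += widths[j - 1]
--             if width > W:
--                 break
--             h = max(h, heights[j - 1])
--             cand = dp[j - 1][0] + h
--             if cand <= best[0]:
--                 best = (cand, dp[j - 1][1] + 1, dp[j - 1][2] + [i - j + 1])
--         dp.append(best)
--     return dp[n][1], dp[n][0], dp[n][2]
-- ===== Notes on version B (the rewrite author's own statement) =====
-- stated objective: faster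
-- what changed: A rebuilds every segment j..i from scratch in a third nested loop; B lets the start index j descend while the segment's total width and max height accumulate incrementally, turning the O(n^3) DP into an O(n^2) one (<= on descending j preserves A's smallest-j tie-break). Pre_ restricts to the natural domain: n within both lists (else A raises IndexError) and every painting width in [0, W] -- widths are physical sizes, negative widths make A's result an artefact of its break-on-prefix scan order, and a painting wider than W leaves A's cost at float('inf'), not an int of the declared type.
-- outside the precondition, e.g. on program4(1, 0, [1], [1]): A returns (0, inf, []), B returns (0, inf, []); on program4(2, 6, [1, 1], [-5, 10]): A returns (1, 1, [2]), B returns (0, inf, []); on program4(-1, 5, [], []): A raises IndexError, B returns (0, 0, [])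
import Mathlib
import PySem

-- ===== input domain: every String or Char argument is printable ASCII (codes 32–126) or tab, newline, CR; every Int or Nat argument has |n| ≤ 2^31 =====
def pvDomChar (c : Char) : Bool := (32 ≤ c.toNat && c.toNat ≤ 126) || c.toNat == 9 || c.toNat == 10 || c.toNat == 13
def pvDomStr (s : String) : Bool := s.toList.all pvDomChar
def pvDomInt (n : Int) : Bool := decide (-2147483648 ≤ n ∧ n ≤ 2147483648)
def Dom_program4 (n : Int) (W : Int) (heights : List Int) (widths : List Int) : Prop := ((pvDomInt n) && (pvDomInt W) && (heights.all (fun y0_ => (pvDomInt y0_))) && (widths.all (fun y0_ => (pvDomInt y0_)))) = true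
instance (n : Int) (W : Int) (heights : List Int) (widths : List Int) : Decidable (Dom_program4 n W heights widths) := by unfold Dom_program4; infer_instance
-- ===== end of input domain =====

-- B replaces A's cubic per-segment re-scan by a quadratic scan that accumulates each
-- segment's total width and max height incrementally while the start index descends;
-- equivalence of the RETURN value is proved on Pre_program4 (the natural domain:
-- n within both lists, painting widths in [0, W]).

-- ===== PORT A =====
-- A's dp cost float('inf') is modelled as `none`; pvOptLt is Python's `<` on such costs
-- (inf < inf = False, c < inf = True, inf < c = False; exact for the values A compares).
def pvOptLt : Option Int → Option Int → Bool
  | none, _ => false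
  | some _, none => true
  | some a, some b => a < b

-- the k-loop: total_width/max_height over range(j, i+1), breaking as soon as total_width > W
def pvA_kloop (W : Int) (heights widths : List Int) : List Int → Int → Int → Int × Int
  | [], tw, mh => (tw, mh)
  | k :: ks, tw, mh =>
    let tw' := tw + PySem.List.pyGetD widths (k - 1) 0   -- widths[k-1]; index in range under Pre_
    if W < tw' then (tw', mh)
    else pvA_kloop W heights widths ks tw' (max mh (PySem.List.pyGetD heights (k - 1) 0))

-- one iteration of A's j-loop (body mutating dp[i])
def pvA_jstep (W : Int) (heights widths : List Int) (i : Int)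
    (dp : List (Option Int × Int × List Int)) (j : Int) : List (Option Int × Int × List Int) :=
  let r := pvA_kloop W heights widths (PySem.List.pyRange j (i + 1)) 0 0
  if r.1 ≤ W then
    let prev := PySem.List.pyGetD dp (j - 1) (none, 0, [])   -- dp[j-1]; in range under Pre_
    let cur : Option Int := prev.1.map (fun c => c + r.2)    -- inf + max_height = inf
    let cell := PySem.List.pyGetD dp i (none, 0, [])
    if pvOptLt cur cell.1 then
      PySem.List.pySetD dp i (cur, prev.2.1 + 1, prev.2.2 ++ [i - j + 1])
    else dp
  else dp

def pvA_istep (W : Int) (heights widths : List Int)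
    (dp : List (Option Int × Int × List Int)) (i : Int) : List (Option Int × Int × List Int) :=
  (PySem.List.pyRange 1 (i + 1)).foldl (pvA_jstep W heights widths i) dp

def program4 (n : Int) (W : Int) (heights : List Int) (widths : List Int) : Int × Int × List Int :=
  -- dp = [(inf, 0, [])] * (n + 1); dp[0] = (0, 0, [])  (the dp[0] assignment raises for n < 0: outside Pre_)
  let dp0 := PySem.List.pySetD
    (List.replicate (n + 1).toNat ((none : Option Int), (0 : Int), ([] : List Int))) 0 (some 0, 0, [])
  let dp := (PySem.List.pyRange 1 (n + 1)).foldl (pvA_istep W heights widths) dp0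
  let cell := PySem.List.pyGetD dp n ((none : Option Int), (0 : Int), ([] : List Int))
  -- Python returns dp[n][1], dp[n][0], dp[n][2]; under Pre_ the cost dp[n][0] is an int,
  -- never float('inf'), so the `.getD 0` is never the value returned by the Python
  (cell.2.1, cell.1.getD 0, cell.2.2)

-- ===== PORT B =====
-- B's cost float('inf') (dp entries, best's initial cost) is modelled as `none`;
-- pvLeOpt is Python's `<=` on such costs.
def pvLeOpt : Option Int → Option Int → Bool
  | none, none => true
  | none, some _ => false
  | some _, none => true
  | some a, some b => a ≤ b

def pvB_jloop (W : Int) (heights widths : List Int)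
    (dp : List (Option Int × Int × List Int)) (i : Int) :
    List Int → Int → Int → (Option Int × Int × List Int) → (Option Int × Int × List Int)
  | [], _, _, best => best
  | j :: js, width, h, best =>
    let width' := width + PySem.List.pyGetD widths (j - 1) 0   -- widths[j-1]; in range under Pre_
    if W < width' then best                                    -- break
    else
      let h' := max h (PySem.List.pyGetD heights (j - 1) 0)
      let prev := PySem.List.pyGetD dp (j - 1) (none, 0, [])   -- dp[j-1]; in range (dp has grown past j-1)
      let cand : Option Int := prev.1.map (fun c => c + h')
      let best' :=
        if pvLeOpt cand best.1 then (cand, prev.2.1 + 1, prev.2.2 ++ [i - j + 1]) else best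
      pvB_jloop W heights widths dp i js width' h' best'

def pvB_istep (W : Int) (heights widths : List Int)
    (dp : List (Option Int × Int × List Int)) (i : Int) : List (Option Int × Int × List Int) :=
  dp ++ [pvB_jloop W heights widths dp i (PySem.List.pyRange i 0 (-1)) 0 0
    ((none : Option Int), (0 : Int), ([] : List Int))]

def program4_alt (n : Int) (W : Int) (heights : List Int) (widths : List Int) : Int × Int × List Int :=
  let dp := (PySem.List.pyRange 1 (n + 1)).foldl (pvB_istep W heights widths)
    [((some 0 : Option Int), (0 : Int), ([] : List Int))]
  let cell := PySem.List.pyGetD dp n ((none : Option Int), (0 : Int), ([] : List Int))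
  -- Python returns dp[n][1], dp[n][0], dp[n][2]; under Pre_ the cost is an int, never inf
  (cell.2.1, cell.1.getD 0, cell.2.2)

-- ===== PRECONDITION & SPEC =====
-- Pre_ restricts to the NATURAL DOMAIN of the task and excludes: n < 0 (A raises IndexError
-- assigning dp[0]); n > len(heights) or n > len(widths) (IndexError in A's inner loop);
-- a negative painting width (widths are physical sizes; there A's break-on-prefix early
-- exit makes its result an artefact of scan order); and a painting wider than W, where no
-- arrangement fits and A's cost stays float('inf') — a float, not an int of the declared
-- return type.  See the cites in the claim for excluded inputs on which A still returns.
def Pre_program4 (n : Int) (W : Int) (heights : List Int) (widths : List Int) : Prop :=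
  0 ≤ n ∧ n ≤ (heights.length : Int) ∧ n ≤ (widths.length : Int) ∧
    ∀ k : Nat, k < n.toNat → 0 ≤ widths.getD k 0 ∧ widths.getD k 0 ≤ W
instance (n : Int) (W : Int) (heights : List Int) (widths : List Int) :
    Decidable (Pre_program4 n W heights widths) := by unfold Pre_program4; infer_instance

def pvWitness_program4 : Int × Int × List Int × List Int := (3, 10, [4, 2, 5], [3, 6, 4])

def Spec_program4 (n : Int) (W : Int) (heights : List Int) (widths : List Int) (out : Int × Int × List Int) : Prop := out = program4_alt n W heights widths
instance (n : Int) (W : Int) (heights : List Int) (widths : List Int) (out : Int × Int × List Int) : Decidable (Spec_program4 n W heights widths out) := by unfold Spec_program4; infer_instance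

-- ===== CLAIM (what is proved, stated in full; the proofs are below) =====
def Claim_equal_program4 : Prop := ∀ (n : Int) (W : Int) (heights : List Int) (widths : List Int), Dom_program4 n W heights widths → Pre_program4 n W heights widths → Spec_program4 n W heights widths (program4 n W heights widths)

-- ===== LEMMAS AND PROOFS =====

-- entries of the dp table (finite cost, platform count, distribution)
abbrev pvEnt : Type := Int × Int × List Int

-- max over the nonempty prefix sums of a list (0 for []) — characterises A's break
def pvMP : List Int → Int
  | [] => 0
  | w :: ws => w + max 0 (pvMP ws)

-- max of a list and 0
def pvMX : List Int → Int
  | [] => 0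
  | a :: as => max a (pvMX as)

-- a dp entry with optional (= possibly inf) cost rendered as the stored cell
def pvUnconv : Option pvEnt → Option Int × Int × List Int
  | none => (none, 0, [])
  | some (c, p, d) => (some c, p, d)

-- the candidate produced by start index j (1 ≤ j ≤ i), read off the dp prefix
def pvCandA (W : Int) (heights widths : List Int) (dp : List (Option Int × Int × List Int)) (i j : Nat) : Option pvEnt :=
  if pvMP ((widths.take i).drop (j - 1)) ≤ W then
    (dp.getD (j - 1) (none, 0, [])).1.map
      (fun c => (c + pvMX ((heights.take i).drop (j - 1)),
                 (dp.getD (j - 1) (none, 0, [])).2.1 + 1,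
                 (dp.getD (j - 1) (none, 0, [])).2.2 ++ [(i : Int) - (j : Int) + 1]))
  else none

def pvStepLt (best : Option pvEnt) (o : Option pvEnt) : Option pvEnt :=
  match o with
  | none => best
  | some e => match best with
    | none => some e
    | some b => if e.1 < b.1 then some e else best

def pvStepLe (best : Option pvEnt) (o : Option pvEnt) : Option pvEnt :=
  match o with
  | none => best
  | some e => match best with
    | none => some e
    | some b => if e.1 ≤ b.1 then some e else best

def pvFirstMin : List pvEnt → Option pvEnt
  | [] => none
  | e :: es => match pvFirstMin es with
    | none => some e
    | some m => if m.1 < e.1 then some m else some e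

lemma pvMX_nonneg (l : List Int) : 0 ≤ pvMX l := by
  induction l with
  | nil => simp [pvMX]
  | cons a as ih => simp [pvMX]; omega

lemma pvMP_nonneg_of_nonneg (l : List Int) (h : ∀ x ∈ l, 0 ≤ x) : 0 ≤ pvMP l := by
  induction l with
  | nil => simp [pvMP]
  | cons a as ih =>
    have ha := h a (by simp)
    simp only [pvMP]
    omega

lemma pvMP_eq_sum (l : List Int) (h : ∀ x ∈ l, 0 ≤ x) : pvMP l = l.sum := by
  induction l with
  | nil => simp [pvMP]
  | cons a as ih =>
    have has : ∀ x ∈ as, 0 ≤ x := fun x hx => h x (by simp [hx])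
    have h1 : 0 ≤ as.sum := (ih has) ▸ pvMP_nonneg_of_nonneg as has
    simp only [pvMP, List.sum_cons, ih has]
    omega

lemma pvSum_drop_le (l : List Int) (h : ∀ x ∈ l, 0 ≤ x) : ∀ k : Nat, (l.drop k).sum ≤ l.sum := by
  induction l with
  | nil => intro k; simp
  | cons a as ih =>
    intro k
    cases k with
    | zero => simp
    | succ k =>
      have has : ∀ x ∈ as, 0 ≤ x := fun x hx => h x (by simp [hx])
      have := ih has k
      have ha := h a (by simp)
      simp only [List.drop_succ_cons, List.sum_cons]
      omega

lemma pvSum_drop_mono (l : List Int) (h : ∀ x ∈ l, 0 ≤ x) (a b : Nat) (hab : a ≤ b) :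
    (l.drop b).sum ≤ (l.drop a).sum := by
  have hd : l.drop b = (l.drop a).drop (b - a) := by
    rw [List.drop_drop]
    congr 1
    omega
  rw [hd]
  exact pvSum_drop_le (l.drop a) (fun x hx => h x (List.mem_of_mem_drop hx)) (b - a)

lemma pvFirstMin_cons (e : pvEnt) (cs : List pvEnt) :
    pvFirstMin (e :: cs) = pvStepLt (some e) (pvFirstMin cs) := by
  cases h : pvFirstMin cs <;> simp [pvFirstMin, pvStepLt, h]

lemma pvStepLt_assoc (acc : Option pvEnt) (e : pvEnt) (M : Option pvEnt) :
    pvStepLt (pvStepLt acc (some e)) M = pvStepLt acc (pvStepLt (some e) M) := by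
  cases M with
  | none => cases acc <;> simp [pvStepLt]
  | some m =>
    cases acc with
    | none => simp only [pvStepLt]; split_ifs <;> rfl
    | some a =>
      by_cases hp : e.1 < a.1 <;> by_cases hq : m.1 < e.1 <;> by_cases hr : m.1 < a.1 <;>
        simp [pvStepLt, hp, hq, hr] <;> omega

lemma pvFoldLt (os : List (Option pvEnt)) : ∀ acc : Option pvEnt,
    os.foldl pvStepLt acc = pvStepLt acc (pvFirstMin (os.filterMap id)) := by
  induction os with
  | nil => intro acc; cases acc <;> simp [pvFirstMin, pvStepLt]
  | cons o rest ih =>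
    intro acc
    cases o with
    | none => simpa [pvStepLt] using ih acc
    | some e =>
      simp only [List.foldl_cons, List.filterMap_cons, id]
      rw [ih, pvStepLt_assoc]
      rw [show List.filterMap (fun x : Option pvEnt => x) rest = List.filterMap id rest from rfl,
        pvFirstMin_cons]

lemma pvStepLe_flip (e : pvEnt) (M : Option pvEnt) :
    pvStepLe M (some e) = pvStepLt (some e) M := by
  cases M with
  | none => simp [pvStepLe, pvStepLt]
  | some m => simp only [pvStepLe, pvStepLt]; split_ifs <;> first | rfl | omega

lemma pvFoldLe (os : List (Option pvEnt)) :
    os.reverse.foldl pvStepLe none = pvFirstMin (os.filterMap id) := by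
  induction os with
  | nil => simp [pvFirstMin]
  | cons o rest ih =>
    simp only [List.reverse_cons, List.foldl_append, List.foldl_cons, List.foldl_nil, ih]
    cases o with
    | none => simp [pvStepLe]
    | some e =>
      simp only [List.filterMap_cons, id]
      rw [show List.filterMap (fun x : Option pvEnt => x) rest = List.filterMap id rest from rfl,
        pvFirstMin_cons, pvStepLe_flip]

lemma pvFold_lt_eq_le (os : List (Option pvEnt)) :
    os.foldl pvStepLt none = os.reverse.foldl pvStepLe none := by
  rw [pvFoldLt, pvFoldLe]; cases pvFirstMin (os.filterMap id) <;> simp [pvStepLt]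

lemma pvFoldLe_nones (os : List (Option pvEnt)) (h : ∀ o ∈ os, o = none) :
    ∀ bo : Option pvEnt, os.foldl pvStepLe bo = bo := by
  induction os with
  | nil => intro bo; rfl
  | cons o rest ih =>
    intro bo
    have ho := h o (by simp)
    subst ho
    simp only [List.foldl_cons, pvStepLe]
    exact ih (fun o' ho' => h o' (by simp [ho'])) bo

lemma pvFirstMin_isSome (l : List pvEnt) (h : l ≠ []) : (pvFirstMin l).isSome := by
  cases l with
  | nil => exact absurd rfl h
  | cons e es =>
    simp only [pvFirstMin]
    cases pvFirstMin es with
    | none => rfl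
    | some m => by_cases hlt : m.1 < e.1 <;> simp [hlt]

-- helper: decompose the segment at its head
lemma seg_cons (xs : List Int) (i j : Nat) (h1 : 1 ≤ j) (hji : j ≤ i) (hlen : i ≤ xs.length) :
    (xs.take i).drop (j - 1) = xs[j - 1]'(by omega) :: (xs.take i).drop j := by
  have hlt : j - 1 < (xs.take i).length := by rw [List.length_take]; omega
  have hj : j - 1 + 1 = j := by omega
  rw [List.drop_eq_getElem_cons hlt, List.getElem_take, hj]

lemma pvA_kloop_char (W : Int) (heights widths : List Int) (i : Nat)
    (hiw : i ≤ widths.length) (hih : i ≤ heights.length) :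
    ∀ (d j : Nat) (tw mh : Int), i - j < d → 1 ≤ j → j ≤ i → 0 ≤ mh →
    (((pvA_kloop W heights widths (PySem.List.pyRange (j : Int) ((i : Int) + 1)) tw mh).1 ≤ W)
        ↔ tw + pvMP ((widths.take i).drop (j - 1)) ≤ W)
    ∧ (tw + pvMP ((widths.take i).drop (j - 1)) ≤ W →
        pvA_kloop W heights widths (PySem.List.pyRange (j : Int) ((i : Int) + 1)) tw mh
          = (tw + ((widths.take i).drop (j - 1)).sum, max mh (pvMX ((heights.take i).drop (j - 1))))) := by
  intro d
  induction d with
  | zero => intro j tw mh hd h1 hji hmh; omega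
  | succ d ih =>
    intro j tw mh hd h1 hji hmh
    have hcons := PySem.List.pyRange_one_cons (a := (j:Int)) (b := (i:Int)+1) (by exact_mod_cast by omega)
    have hwidx : PySem.List.pyGetD widths ((j:Int) - 1) 0 = widths[j-1]'(by omega) := by
      rw [show (j:Int) - 1 = ((j-1 : Nat) : Int) by omega, PySem.List.pyGetD_natCast,
        List.getD_eq_getElem _ _ (by omega)]
    have hhidx : PySem.List.pyGetD heights ((j:Int) - 1) 0 = heights[j-1]'(by omega) := by
      rw [show (j:Int) - 1 = ((j-1 : Nat) : Int) by omega, PySem.List.pyGetD_natCast,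
        List.getD_eq_getElem _ _ (by omega)]
    have hsegw := seg_cons widths i j h1 hji hiw
    have hsegh := seg_cons heights i j h1 hji hih
    rw [hcons]
    by_cases hb : W < tw + widths[j-1]'(by omega)
    · rw [hsegw, hsegh]
      refine ⟨?_, ?_⟩
      · simp only [pvA_kloop, hwidx, if_pos hb, pvMP]
        have := le_max_left 0 (pvMP ((widths.take i).drop j))
        constructor
        · intro h; omega
        · intro h; omega
      · intro h
        exfalso
        simp only [pvMP] at h
        have := le_max_left 0 (pvMP ((widths.take i).drop j))
        omega
    · by_cases hlast : j = i
      · subst hlast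
        have hrest : PySem.List.pyRange ((j:Int) + 1) ((j:Int) + 1) = [] :=
          PySem.List.pyRange_one_eq_nil (by omega)
        have hdrop : (widths.take j).drop j = ([] : List Int) :=
          List.drop_eq_nil_of_le (by rw [List.length_take]; omega)
        have hdroph : (heights.take j).drop j = ([] : List Int) :=
          List.drop_eq_nil_of_le (by rw [List.length_take]; omega)
        rw [hsegw, hsegh, hdrop, hdroph]
        simp only [pvA_kloop, hwidx, hhidx, if_neg hb, hrest, pvMP, pvMX, List.sum_cons,
          List.sum_nil]
        constructor
        · constructor <;> (intro h; omega)
        · intro h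
          simp only [Prod.mk.injEq]
          constructor
          · omega
          · omega
      · have hji' : j + 1 ≤ i := by omega
        have ihq := ih (j + 1) (tw + widths[j-1]'(by omega)) (max mh (heights[j-1]'(by omega)))
          (by omega) (by omega) hji' (by omega)
        have hj1 : j + 1 - 1 = j := by omega
        rw [hj1] at ihq
        rw [hsegw, hsegh]
        simp only [pvA_kloop, hwidx, hhidx, if_neg hb]
        rw [show ((j:Int) + 1) = ((j + 1 : Nat) : Int) by omega]
        constructor
        · rw [ihq.1]
          simp only [pvMP]
          omega
        · intro h
          have hmp : tw + widths[j-1]'(by omega) + pvMP ((widths.take i).drop j) ≤ W := by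
            simp only [pvMP] at h; omega
          rw [ihq.2 hmp]
          simp only [pvMX, List.sum_cons, Prod.mk.injEq]
          constructor
          · omega
          · omega

-- A's j-loop = set dp[i] to a pvStepLt-fold over the candidates (ascending j)
lemma pvA_jfold (W : Int) (heights widths : List Int) (i : Nat)
    (hiw : i ≤ widths.length) (hih : i ≤ heights.length)
    (dp : List (Option Int × Int × List Int)) (hlen : i < dp.length) :
    ∀ (t : Nat) (o : Option pvEnt), t ≤ i → dp.getD i (none, 0, []) = pvUnconv o →
    (PySem.List.pyRange 1 ((t : Int) + 1)).foldl (pvA_jstep W heights widths (i : Int)) dp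
      = PySem.List.pySetD dp (i : Int)
          (pvUnconv (((List.range' 1 t).map (pvCandA W heights widths dp i)).foldl pvStepLt o)) := by
  intro t
  induction t with
  | zero =>
    intro o ht ho
    rw [show ((0 : Nat) : Int) + 1 = 1 from by omega, PySem.List.pyRange_one_eq_nil le_rfl]
    simp only [List.foldl_nil, List.range'_zero, List.map_nil]
    rw [← ho, PySem.List.pySetD_natCast, List.getD_eq_getElem _ _ hlen, List.set_getElem_self]
  | succ t ih =>
    intro o ht ho
    have hts : ((t + 1 : Nat) : Int) + 1 = (((t : Int) + 1) + 1) := by push_cast; omega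
    rw [hts, PySem.List.pyRange_one_succ_right (by omega), List.foldl_append, List.foldl_cons,
      List.foldl_nil, ih o (by omega) ho]
    rw [List.range'_concat, List.map_append, List.foldl_append]
    rw [show (1 + 1 * t) = t + 1 from by omega]
    simp only [List.map_cons, List.map_nil, List.foldl_cons, List.foldl_nil]
    set oT := ((List.range' 1 t).map (pvCandA W heights widths dp i)).foldl pvStepLt o with hoT
    -- one j-step at j = t + 1, acting on dp with slot i set to oT
    have hkc := pvA_kloop_char W heights widths i hiw hih (i + 1) (t + 1) 0 0
      (by omega) (by omega) (by omega) le_rfl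
    simp only [Nat.add_sub_cancel] at hkc
    have hcast : ((t : Int) + 1) = ((t + 1 : Nat) : Int) := by push_cast; omega
    have hlen' : ((PySem.List.pySetD dp (i : Int) (pvUnconv oT))).length = dp.length := by
      rw [PySem.List.length_pySetD]
    simp only [pvA_jstep]
    rw [hcast]
    by_cases hfeas : pvMP ((widths.take i).drop t) ≤ W
    · have hcond : (pvA_kloop W heights widths
          (PySem.List.pyRange ((t + 1 : Nat) : Int) ((i : Int) + 1)) 0 0).1 ≤ W :=
        hkc.1.mpr (by omega)
      have hrval := hkc.2 (by omega)
      rw [if_pos hcond, hrval]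
      have hget_t : PySem.List.pyGetD (PySem.List.pySetD dp (i : Int) (pvUnconv oT))
          (((t + 1 : Nat) : Int) - 1) ((none : Option Int), (0 : Int), ([] : List Int))
          = dp.getD t (none, 0, []) := by
        rw [show (((t + 1 : Nat) : Int) - 1) = ((t : Nat) : Int) from by push_cast; omega,
          PySem.List.pyGetD_pySetD_natCast _ _ _ _ _ hlen, if_neg (by omega),
          PySem.List.pyGetD_natCast]
      have hget_i : PySem.List.pyGetD (PySem.List.pySetD dp (i : Int) (pvUnconv oT))
          ((i : Nat) : Int) ((none : Option Int), (0 : Int), ([] : List Int)) = pvUnconv oT := by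
        rw [PySem.List.pyGetD_pySetD_natCast _ _ _ _ _ hlen, if_pos rfl]
      rw [hget_t, hget_i]
      have hmx : max (0 : Int) (pvMX ((heights.take i).drop t)) = pvMX ((heights.take i).drop t) :=
        max_eq_right (pvMX_nonneg _)
      simp only [hmx]
      unfold pvCandA
      rw [Nat.add_sub_cancel, if_pos hfeas]
      cases hprev : (dp.getD t ((none : Option Int), (0 : Int), ([] : List Int))).1 with
      | none =>
        simp only [Option.map_none]
        cases oT <;> simp [pvOptLt, pvStepLt, pvUnconv]
      | some c =>
        simp only [Option.map_some]
        cases oT with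
        | none =>
          simp only [pvOptLt, pvUnconv, pvStepLt, if_true]
          rw [PySem.List.pySetD_natCast, PySem.List.pySetD_natCast, PySem.List.pySetD_natCast,
            List.set_set]
        | some b =>
          obtain ⟨bc, bp, bd⟩ := b
          simp only [pvUnconv, pvOptLt, pvStepLt]
          by_cases hlt : c + pvMX ((heights.take i).drop t) < bc
          · rw [if_pos (by exact decide_eq_true hlt)]
            simp only [if_pos hlt]
            rw [PySem.List.pySetD_natCast, PySem.List.pySetD_natCast, PySem.List.pySetD_natCast,
              List.set_set]
          · rw [if_neg (by simpa using hlt)]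
            simp only [if_neg hlt]
    · have hcond : ¬ (pvA_kloop W heights widths
          (PySem.List.pyRange ((t + 1 : Nat) : Int) ((i : Int) + 1)) 0 0).1 ≤ W := by
        rw [hkc.1]; omega
      rw [if_neg hcond]
      unfold pvCandA
      rw [Nat.add_sub_cancel, if_neg hfeas]
      simp [pvStepLt]

-- if B breaks even on the full segment, every candidate is infeasible
lemma pvCands_none (W : Int) (heights widths : List Int) (i : Nat)
    (dp : List (Option Int × Int × List Int))
    (Hnn : ∀ x ∈ widths.take i, 0 ≤ x) (t : Nat) (_hti : t ≤ i)
    (hbig : W < ((widths.take i).drop t).sum) :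
    ∀ o ∈ (List.range' 1 (t + 1)).map (pvCandA W heights widths dp i), o = none := by
  intro o ho
  obtain ⟨j, hj, rfl⟩ := List.mem_map.mp ho
  obtain ⟨hj1, hj2⟩ := List.mem_range'_1.mp hj
  unfold pvCandA
  have hmono := pvSum_drop_mono (widths.take i) Hnn (j - 1) t (by omega)
  rw [if_neg (by
    rw [pvMP_eq_sum _ (fun x hx => Hnn x (List.mem_of_mem_drop hx))]
    omega)]

-- B's j-loop (descending, accumulating, breaking) = a pvStepLe-fold over the reversed candidates
lemma pvB_jfold (W : Int) (heights widths : List Int) (i : Nat)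
    (hiw : i ≤ widths.length) (hih : i ≤ heights.length)
    (dp : List (Option Int × Int × List Int))
    (Hnn : ∀ x ∈ widths.take i, 0 ≤ x)
    (Hfin : ∀ k : Nat, k < i → ((dp.getD k ((none : Option Int), (0 : Int), ([] : List Int))).1).isSome) :
    ∀ (t : Nat), t ≤ i → ∀ (bo : Option pvEnt), ((widths.take i).drop t).sum ≤ W →
    pvB_jloop W heights widths dp (i : Int) (PySem.List.pyRange (t : Int) 0 (-1))
        (((widths.take i).drop t).sum) (pvMX ((heights.take i).drop t)) (pvUnconv bo)
      = pvUnconv ((((List.range' 1 t).map (pvCandA W heights widths dp i)).reverse).foldl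
          pvStepLe bo) := by
  intro t
  induction t with
  | zero =>
    intro _ bo _
    rw [show ((0 : Nat) : Int) = 0 from rfl, PySem.List.pyRange_neg_one_eq_reverse,
      PySem.List.pyRange_one_eq_nil le_rfl]
    simp [pvB_jloop]
  | succ t ih =>
    intro ht bo hent
    have hnnd : ∀ x ∈ (widths.take i).drop t, 0 ≤ x :=
      fun x hx => Hnn x (List.mem_of_mem_drop hx)
    have hcons : PySem.List.pyRange ((t + 1 : Nat) : Int) 0 (-1)
        = ((t + 1 : Nat) : Int) :: PySem.List.pyRange ((t : Nat) : Int) 0 (-1) := by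
      rw [show ((t : Nat) : Int) = ((t + 1 : Nat) : Int) - 1 from by push_cast; omega,
        PySem.List.pyRange_neg_one_cons (by exact_mod_cast by omega)]
    have hsegw := seg_cons widths i (t + 1) (by omega) (by omega) hiw
    have hsegh := seg_cons heights i (t + 1) (by omega) (by omega) hih
    simp only [Nat.add_sub_cancel] at hsegw hsegh
    have hwidx : PySem.List.pyGetD widths (((t + 1 : Nat) : Int) - 1) 0 = widths[t]'(by omega) := by
      rw [show (((t + 1 : Nat) : Int) - 1) = ((t : Nat) : Int) from by push_cast; omega,
        PySem.List.pyGetD_natCast, List.getD_eq_getElem _ _ (by omega)]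
    have hhidx : PySem.List.pyGetD heights (((t + 1 : Nat) : Int) - 1) 0 = heights[t]'(by omega) := by
      rw [show (((t + 1 : Nat) : Int) - 1) = ((t : Nat) : Int) from by push_cast; omega,
        PySem.List.pyGetD_natCast, List.getD_eq_getElem _ _ (by omega)]
    have hdpidx : PySem.List.pyGetD dp (((t + 1 : Nat) : Int) - 1)
          ((none : Option Int), (0 : Int), ([] : List Int))
        = dp.getD t (none, 0, []) := by
      rw [show (((t + 1 : Nat) : Int) - 1) = ((t : Nat) : Int) from by push_cast; omega,
        PySem.List.pyGetD_natCast]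
    have hsum : widths[t]'(by omega) + ((widths.take i).drop (t + 1)).sum
        = ((widths.take i).drop t).sum := by
      rw [hsegw]; simp [List.sum_cons]
    rw [hcons]
    simp only [pvB_jloop, hwidx, hhidx, hdpidx]
    rw [show ((widths.take i).drop (t + 1)).sum + widths[t]'(by omega)
        = ((widths.take i).drop t).sum from by omega]
    by_cases hbr : W < ((widths.take i).drop t).sum
    case pos =>
      rw [if_pos hbr]
      rw [pvFoldLe_nones _ (fun o ho =>
        pvCands_none W heights widths i dp Hnn t (by omega) hbr o
          (List.mem_reverse.mp ho)) bo]
    rw [if_neg hbr]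
    have hh' : max (pvMX ((heights.take i).drop (t + 1))) (heights[t]'(by omega))
        = pvMX ((heights.take i).drop t) := by
      rw [hsegh]; simp only [pvMX]; omega
    rw [hh']
    obtain ⟨c, hc⟩ := Option.isSome_iff_exists.mp (Hfin t (by omega))
    have hcand : pvCandA W heights widths dp i (t + 1)
        = some (c + pvMX ((heights.take i).drop t),
                (dp.getD t ((none : Option Int), (0 : Int), ([] : List Int))).2.1 + 1,
                (dp.getD t ((none : Option Int), (0 : Int), ([] : List Int))).2.2
                  ++ [(i : Int) - ((t + 1 : Nat) : Int) + 1]) := by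
      unfold pvCandA
      rw [Nat.add_sub_cancel, if_pos (by rw [pvMP_eq_sum _ hnnd]; omega), hc]
      simp
    have hbest' : (if pvLeOpt ((dp.getD t ((none : Option Int), (0 : Int), ([] : List Int))).1.map
            (fun c => c + pvMX ((heights.take i).drop t))) (pvUnconv bo).1 then
          ((dp.getD t ((none : Option Int), (0 : Int), ([] : List Int))).1.map
            (fun c => c + pvMX ((heights.take i).drop t)),
           (dp.getD t ((none : Option Int), (0 : Int), ([] : List Int))).2.1 + 1,
           (dp.getD t ((none : Option Int), (0 : Int), ([] : List Int))).2.2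
             ++ [(i : Int) - ((t + 1 : Nat) : Int) + 1])
          else pvUnconv bo)
        = pvUnconv (pvStepLe bo (pvCandA W heights widths dp i (t + 1))) := by
      rw [hcand, hc]
      simp only [Option.map_some]
      cases bo with
      | none => simp [pvUnconv, pvLeOpt, pvStepLe]
      | some b =>
        obtain ⟨bc, bp, bd⟩ := b
        simp only [pvUnconv, pvLeOpt, pvStepLe]
        by_cases hle : c + pvMX ((heights.take i).drop t) ≤ bc
        · rw [if_pos (by exact decide_eq_true hle), if_pos hle]
        · rw [if_neg (by simpa using hle), if_neg hle]
    rw [hbest']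
    rw [List.range'_concat, show (1 + 1 * t) = t + 1 from by omega, List.map_append,
      List.reverse_append]
    simp only [List.map_cons, List.map_nil, List.reverse_cons, List.reverse_nil, List.nil_append,
      List.singleton_append, List.foldl_cons]
    exact ih (by omega) (pvStepLe bo (pvCandA W heights widths dp i (t + 1))) (by omega)


-- the main invariant tying A's dp array to B's grown dp list after i outer iterations
lemma pvMain_inv (W : Int) (heights widths : List Int) (N : Nat)
    (hiw : N ≤ widths.length) (hih : N ≤ heights.length)
    (HwW : ∀ k : Nat, k < N → 0 ≤ widths.getD k 0 ∧ widths.getD k 0 ≤ W) :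
    ∀ i : Nat, i ≤ N →
    ((PySem.List.pyRange 1 ((i : Int) + 1)).foldl (pvA_istep W heights widths)
        (PySem.List.pySetD (List.replicate (N + 1) ((none : Option Int), (0 : Int), ([] : List Int))) 0
          (some 0, 0, []))).length = N + 1
    ∧ ((PySem.List.pyRange 1 ((i : Int) + 1)).foldl (pvB_istep W heights widths)
        [((some 0 : Option Int), (0 : Int), ([] : List Int))]).length = i + 1
    ∧ (∀ t : Nat, t ≤ i →
        ((((PySem.List.pyRange 1 ((i : Int) + 1)).foldl (pvB_istep W heights widths)
            [((some 0 : Option Int), (0 : Int), ([] : List Int))]).getD t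
              ((none : Option Int), (0 : Int), ([] : List Int))).1).isSome)
    ∧ ∀ t : Nat, t ≤ N →
        ((PySem.List.pyRange 1 ((i : Int) + 1)).foldl (pvA_istep W heights widths)
          (PySem.List.pySetD (List.replicate (N + 1) ((none : Option Int), (0 : Int), ([] : List Int))) 0
            (some 0, 0, []))).getD t (none, 0, [])
        = ((PySem.List.pyRange 1 ((i : Int) + 1)).foldl (pvB_istep W heights widths)
            [((some 0 : Option Int), (0 : Int), ([] : List Int))]).getD t (none, 0, []) := by
  have Hnn : ∀ (m : Nat), m ≤ N → ∀ x ∈ widths.take m, 0 ≤ x := by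
    intro m hm x hx
    obtain ⟨k, hk, hkx⟩ := List.mem_iff_getElem.mp hx
    have hk' : k < m := by
      have := hk
      rw [List.length_take] at this
      omega
    rw [List.getElem_take] at hkx
    have := (HwW k (by omega)).1
    rw [List.getD_eq_getElem _ _ (by omega)] at this
    omega
  intro i
  induction i with
  | zero =>
    intro _
    rw [show ((0 : Nat) : Int) + 1 = 1 from by omega, PySem.List.pyRange_one_eq_nil le_rfl]
    simp only [List.foldl_nil]
    refine ⟨by simp [PySem.List.length_pySetD], rfl, ?_, ?_⟩
    · intro t ht
      interval_cases t
      rfl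
    · intro t htN
      rw [show PySem.List.pySetD
            (List.replicate (N + 1) ((none : Option Int), (0 : Int), ([] : List Int))) 0
            (some 0, 0, [])
          = (List.replicate (N + 1) ((none : Option Int), (0 : Int), ([] : List Int))).set 0
            (some 0, 0, []) from PySem.List.pySetD_natCast (n := 0) ..]
      rcases Nat.eq_zero_or_pos t with ht0 | htpos
      · subst ht0
        rw [List.getD_eq_getElem _ _ (by simp), List.getElem_set_self (by simp)]
        rfl
      · rw [List.getD_eq_getElem _ _ (by simp; omega)]
        rw [List.getElem_set_ne (by omega), List.getElem_replicate]
        rw [List.getD_eq_default _ _ (by simp; omega)]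
  | succ i ih =>
    intro hi
    obtain ⟨hA, hB, hfin, hinv⟩ := ih (by omega)
    have hpeel : PySem.List.pyRange 1 (((i + 1 : Nat) : Int) + 1)
        = PySem.List.pyRange 1 ((i : Int) + 1) ++ [(i : Int) + 1] := by
      rw [show (((i + 1 : Nat) : Int) + 1) = ((i : Int) + 1) + 1 from by push_cast; omega,
        PySem.List.pyRange_one_succ_right (by omega)]
    rw [hpeel]
    simp only [List.foldl_append, List.foldl_cons, List.foldl_nil]
    set dpA := (PySem.List.pyRange 1 ((i : Int) + 1)).foldl (pvA_istep W heights widths)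
      (PySem.List.pySetD (List.replicate (N + 1) ((none : Option Int), (0 : Int), ([] : List Int))) 0
        (some 0, 0, [])) with hdpA
    set dpB := (PySem.List.pyRange 1 ((i : Int) + 1)).foldl (pvB_istep W heights widths)
      [((some 0 : Option Int), (0 : Int), ([] : List Int))] with hdpB
    have hcast : ((i : Int) + 1) = ((i + 1 : Nat) : Int) := by push_cast; omega
    have hlenA : dpA.length = N + 1 := by rw [hdpA]; exact hA
    have hlenB : dpB.length = i + 1 := by rw [hdpB]; exact hB
    have hgA : dpA.getD (i + 1) (none, 0, []) = pvUnconv none := by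
      rw [hinv (i + 1) (by omega), List.getD_eq_default _ _ (by omega)]
      rfl
    have hW0 : (0 : Int) ≤ W := by
      have := HwW 0 (by omega)
      omega
    -- A's step
    have hstepA : pvA_istep W heights widths dpA ((i : Int) + 1)
        = PySem.List.pySetD dpA ((i + 1 : Nat) : Int)
            (pvUnconv (((List.range' 1 (i + 1)).map (pvCandA W heights widths dpA (i + 1))).foldl
              pvStepLt none)) := by
      unfold pvA_istep
      rw [hcast]
      exact pvA_jfold W heights widths (i + 1) (by omega) (by omega) dpA (by omega)
        (i + 1) none le_rfl hgA
    -- B's step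
    have hmp0 : (0 : Int) = ((widths.take (i + 1)).drop (i + 1)).sum := by
      rw [List.drop_eq_nil_of_le (by rw [List.length_take]; omega)]; rfl
    have hmx0 : (0 : Int) = pvMX ((heights.take (i + 1)).drop (i + 1)) := by
      rw [List.drop_eq_nil_of_le (by rw [List.length_take]; omega)]; rfl
    have hfinB : ∀ k : Nat, k < i + 1 →
        ((dpB.getD k ((none : Option Int), (0 : Int), ([] : List Int))).1).isSome := by
      intro k hk; exact hfin k (by omega)
    have hstepB : pvB_istep W heights widths dpB ((i : Int) + 1)
        = dpB ++ [pvUnconv ((((List.range' 1 (i + 1)).map (pvCandA W heights widths dpB (i + 1))).reverse).foldl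
            pvStepLe none)] := by
      unfold pvB_istep
      rw [hcast]
      congr 1
      have hjf := pvB_jfold W heights widths (i + 1) (by omega) (by omega) dpB
        (Hnn (i + 1) (by omega)) hfinB (i + 1) le_rfl none (by rw [← hmp0]; exact hW0)
      rw [← hmp0, ← hmx0] at hjf
      exact congrArg (fun x => [x]) hjf
    -- the two candidate lists coincide
    have hcands : (List.range' 1 (i + 1)).map (pvCandA W heights widths dpA (i + 1))
        = (List.range' 1 (i + 1)).map (pvCandA W heights widths dpB (i + 1)) := by
      apply List.map_congr_left
      intro j hj
      have hj' : 1 ≤ j ∧ j < 1 + (i + 1) := List.mem_range'_1.mp hj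
      unfold pvCandA
      rw [hinv (j - 1) (by omega)]
    have hcell : pvUnconv (((List.range' 1 (i + 1)).map (pvCandA W heights widths dpA (i + 1))).foldl
          pvStepLt none)
        = pvUnconv ((((List.range' 1 (i + 1)).map (pvCandA W heights widths dpB (i + 1))).reverse).foldl
            pvStepLe none) := by
      rw [hcands, pvFold_lt_eq_le]
    -- the new B cell has a finite cost: candidate j = i+1 (the singleton segment) is feasible
    have hnewfin : ((pvUnconv ((((List.range' 1 (i + 1)).map
          (pvCandA W heights widths dpB (i + 1))).reverse).foldl pvStepLe none)).1).isSome := by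
      rw [pvFoldLe]
      have hsegw := seg_cons widths (i + 1) (i + 1) (by omega) le_rfl (by omega)
      simp only [Nat.add_sub_cancel] at hsegw
      have hdropw : (widths.take (i + 1)).drop (i + 1) = ([] : List Int) :=
        List.drop_eq_nil_of_le (by rw [List.length_take]; omega)
      obtain ⟨c, hc⟩ := Option.isSome_iff_exists.mp (hfin i (by omega))
      have hcand : pvCandA W heights widths dpB (i + 1) (i + 1)
          = some (c + pvMX ((heights.take (i + 1)).drop i),
                  (dpB.getD i ((none : Option Int), (0 : Int), ([] : List Int))).2.1 + 1,
                  (dpB.getD i ((none : Option Int), (0 : Int), ([] : List Int))).2.2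
                    ++ [((i + 1 : Nat) : Int) - ((i + 1 : Nat) : Int) + 1]) := by
        unfold pvCandA
        rw [Nat.add_sub_cancel, if_pos ?_, hc]
        · simp
        · rw [hsegw, hdropw]
          have hWi := (HwW i (by omega)).2
          rw [List.getD_eq_getElem _ _ (by omega)] at hWi
          simp only [pvMP]
          omega
      have hmem : pvCandA W heights widths dpB (i + 1) (i + 1)
          ∈ (List.range' 1 (i + 1)).map (pvCandA W heights widths dpB (i + 1)) :=
        List.mem_map_of_mem (List.mem_range'_1.mpr ⟨by omega, by omega⟩)
      have hne : ((List.range' 1 (i + 1)).map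
          (pvCandA W heights widths dpB (i + 1))).filterMap id ≠ [] := by
        intro hnil
        have := (List.filterMap_eq_nil_iff.mp hnil) _ hmem
        rw [hcand] at this
        exact Option.some_ne_none _ this
      obtain ⟨m, hm⟩ := Option.isSome_iff_exists.mp (pvFirstMin_isSome _ hne)
      rw [hm]
      obtain ⟨mc, mp, md⟩ := m
      rfl
    rw [hstepA, hstepB]
    refine ⟨by rw [PySem.List.length_pySetD]; exact hlenA, by simp [hlenB], ?_, ?_⟩
    · intro t ht
      by_cases htc : t = i + 1
      · subst htc
        have hgd : (dpB ++ [pvUnconv ((((List.range' 1 (i + 1)).map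
              (pvCandA W heights widths dpB (i + 1))).reverse).foldl pvStepLe none)]).getD (i + 1)
              ((none : Option Int), (0 : Int), ([] : List Int))
            = pvUnconv ((((List.range' 1 (i + 1)).map
              (pvCandA W heights widths dpB (i + 1))).reverse).foldl pvStepLe none) := by
          rw [List.getD_eq_getElem _ _ (by rw [List.length_append]; simp [hlenB]),
            List.getElem_append_right (by omega)]
          simp [hlenB]
        rw [hgd]
        exact hnewfin
      · rw [List.getD_append _ _ _ _ (by omega)]
        exact hfin t (by omega)
    · intro t htN
      rw [PySem.List.pySetD_natCast]
      by_cases htc : t = i + 1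
      · subst htc
        rw [List.getD_eq_getElem _ _ (by rw [List.length_set, hlenA]; omega),
          List.getElem_set_self (by simp only [List.length_set, hlenA]; omega), hcell]
        rw [List.getD_eq_getElem _ _ (by rw [List.length_append]; simp [hlenB]),
          List.getElem_append_right (by omega)]
        simp [hlenB]
      · rw [List.getD_eq_getElem?_getD, List.getElem?_set, if_neg (by omega),
          ← List.getD_eq_getElem?_getD, hinv t htN]
        by_cases htle : t < i + 1
        · rw [List.getD_append _ _ _ _ (by omega)]
        · rw [List.getD_eq_default _ _ (by omega),
            List.getD_eq_default _ _ (by rw [List.length_append]; simp [hlenB]; omega)]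

-- ===== VERDICT (by name: the statement is the Claim_ definition above) =====
theorem program4_spec : Claim_equal_program4 := by
  intro n W heights widths _ hpre
  obtain ⟨hn, hh, hw, hWk⟩ := hpre
  show program4 n W heights widths = program4_alt n W heights widths
  have hn' : n = ((n.toNat : Nat) : Int) := by omega
  obtain ⟨hA, hB, hfin, hinv⟩ := pvMain_inv W heights widths n.toNat (by omega) (by omega)
    hWk n.toNat le_rfl
  simp only [program4, program4_alt]
  rw [hn']
  rw [show (((n.toNat : Nat) : Int) + 1).toNat = n.toNat + 1 from by omega]
  rw [PySem.List.pyGetD_natCast, PySem.List.pyGetD_natCast]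
  rw [hinv n.toNat le_rfl]
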